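-- pv_equiv track=rewrite | github.com/Anshler/Wildcard_sth_idk | app/search_engine.py | letters_search
-- ===== SOURCE A (Python) =====
-- import math
--
-- def letters_search(word_list, key_element, result):  # xét xem từ này chứa đủ các chữ cái trong key ko
--     letters_key = []  # key_element sau khi bỏ ? * chừa lại chữ cái
--     for i in key_element:
--         if i.find("?") == -1 and i.find("*") == -1:
--             letters_key.append(i)
--     #ko chữ cái, chỉ dấu * trả số lượng >= dấu ?
--     if len(letters_key)==0:
--       if key_element[0].find("*") != -1:
--         if key_element[0].find("?") == -1:
--           return word_list
--         for i in word_list: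
--           if len(i)>=key_element[0].count("?"):
--             result.append(i)
--         return result
--       else: #ko chữ cái, chỉ dấu ? trả số lượng = dấu ?
--         for i in word_list:
--           if len(i) ==len(key_element[0]):
--             result.append(i)
--         return result
--
--     # tìm kiếm
--     for word in word_list:
--         word2 = str(word).lower()  # copy lại word rồi loại bỏ dấu?
--         word2=word2[key_element[0].count("?"):]
--         word2=word2[:len(word2)-key_element[-1].count("?")]
--         for i in range(math.ceil(len(letters_key) / 2)):
--             if word2.find(letters_key[i].lower()) == -1:
--                 word2 = "**"  # nếu ko thì đánh dấu để skip
--                 break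
--             else:
--                 word2 = word2.split(letters_key[i].lower(),1)  # mỗi lần tra nếu ra từ khóa rồi thì cắt để sau này ko bị trùng lặp
--                 word2 = word2[1]
--             if i != (math.ceil(len(letters_key) / 2) - 1) or len(letters_key) % 2 == 0:
--                 if word2.find(letters_key[-(i + 1)].lower()) == -1:
--                     word2 = "**"  # nếu ko thì đánh dấu để skip
--                     break
--                 else:
--                     word2 = word2.rsplit(letters_key[-(i + 1)].lower(), 1)
--                     word2 = word2[0]
--
--         if word2 != "**":
--             result.append(word)
--     return result
-- ===== SOURCE B (Python) =====
-- def letters_search(word_list, key_element, result):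
--     # letters in the key, in order, with all '?'/'*' elements removed
--     letters_key = [k for k in key_element if "?" not in k and "*" not in k]
--     if len(letters_key) == 0:
--         if "*" in key_element[0]:
--             if "?" not in key_element[0]:
--                 return word_list
--             need = key_element[0].count("?")
--             for w in word_list:
--                 if len(w) >= need:
--                     result.append(w)
--             return result
--         else:
--             need = len(key_element[0])
--             for w in word_list:
--                 if len(w) == need:
--                     result.append(w)
--             return result
--
--     lowered = [k.lower() for k in letters_key]
--     head = key_element[0].count("?")
--     tail = key_element[-1].count("?")
--     for word in word_list:
--         word2 = str(word).lower()
--         word2 = word2[head:]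
--         word2 = word2[:len(word2) - tail]
--         ok = True
--         for pat in lowered:
--             pos = word2.find(pat)
--             if pos == -1:
--                 ok = False
--                 break
--             word2 = word2[pos + len(pat):]
--         if ok:
--             result.append(word)
--     return result
-- ===== Notes on version B (the rewrite author's own statement) =====
-- stated objective: simpler
-- what changed: The two-ended convergent matching loop (ceil(n/2) alternation over letters_key[i]/letters_key[-(i+1)] with split/rsplit back-pointers and a '**' skip sentinel) is replaced by a single left-to-right greedy pass that consumes each letter's leftmost occurrence; the no-letter special branches and the '?'-count trimming are kept identical.
-- intended difference: On inputs where some word - lowercased and '?'-trimmed - contains all key letters in order while leaving exactly the two characters '**' between the extremal placements of the first and second half of the letters, A confuses that leftover with its own skip sentinel and silently drops the matching word (A returns [] on (['a**'], ['a'], [])); B returns it (['a**']), which is the intended behaviour of the filter. — e.g. on letters_search(["a**"], ["a"], []): A returns [], B returns ["a**"]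
-- outside the precondition, e.g. on letters_search([], [''], []): A returns [], B returns []; on letters_search(['ba'], ['a', ''], []): A raises ValueError, B returns ['ba']
import Mathlib
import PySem

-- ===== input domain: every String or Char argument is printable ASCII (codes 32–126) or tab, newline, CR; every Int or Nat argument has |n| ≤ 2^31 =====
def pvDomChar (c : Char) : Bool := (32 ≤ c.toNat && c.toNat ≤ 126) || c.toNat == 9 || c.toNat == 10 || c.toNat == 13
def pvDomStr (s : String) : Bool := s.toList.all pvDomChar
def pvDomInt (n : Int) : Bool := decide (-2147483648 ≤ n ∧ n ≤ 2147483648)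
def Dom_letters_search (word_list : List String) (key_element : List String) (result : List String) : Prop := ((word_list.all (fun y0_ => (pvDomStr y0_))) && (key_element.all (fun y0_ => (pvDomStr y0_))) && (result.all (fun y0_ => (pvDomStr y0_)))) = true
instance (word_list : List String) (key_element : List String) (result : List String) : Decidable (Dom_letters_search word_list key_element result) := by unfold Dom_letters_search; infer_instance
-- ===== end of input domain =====

-- B replaces A's two-ended ceil(n/2)/rsplit matching loop with a single left-to-right greedy
-- pass (objective: simpler); equivalence is about the return value only (both Pythons also
-- append to the caller's `result` list in the non-`return word_list` branches, identically).

-- ===== PORT A =====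
-- A-side helpers: the letters_key-building loop and the per-word '?'-count trimming,
-- named so the change region D_ below can read the input through them
def aLetters (key_element : List String) : List String :=
  key_element.foldl (fun acc i =>
    if PySem.Str.find i "?" == -1 && PySem.Str.find i "*" == -1 then acc ++ [i] else acc) []

-- str(word).lower(), then word2[key_element[0].count("?"):], then word2[:len(word2)-key_element[-1].count("?")]
def aTrim (key_element : List String) (word : String) : List Char :=
  let w1 := PySem.List.slice (PySem.Chars.lower word.toList)
    (some ((PySem.Str.count (PySem.List.pyGetD key_element 0 "") "?" : Nat) : Int)) none
  PySem.List.slice w1 none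
    (some ((w1.length : Int) - (PySem.Str.count (PySem.List.pyGetD key_element (-1) "") "?" : Nat)))

def letters_search (word_list : List String) (key_element : List String) (result : List String) : List String :=
  let letters_key := aLetters key_element
  if letters_key.length == 0 then
    -- key_element[0]: IndexError iff key_element = [] (excluded by Pre_)
    let k0 := PySem.List.pyGetD key_element 0 ""
    if PySem.Str.find k0 "*" != -1 then
      if PySem.Str.find k0 "?" == -1 then word_list
      else word_list.foldl (fun res i =>
        if PySem.Str.count k0 "?" ≤ PySem.Str.len i then res ++ [i] else res) result
    else
      word_list.foldl (fun res i =>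
        if PySem.Str.len i == PySem.Str.len k0 then res ++ [i] else res) result
  else
    word_list.foldl (fun res word =>
      let w2 := aTrim key_element word
      -- inner loop; state = (word2, broken); `broken` models Python's `break`
      let st := (PySem.List.pyRange 0 (((letters_key.length + 1) / 2 : Nat) : Int) 1).foldl
        (fun (st : List Char × Bool) i =>
          if st.2 then st
          else
            let li := PySem.Chars.lower ((PySem.List.pyGetD letters_key i "").toList)
            if PySem.Chars.find st.1 li == -1 then (['*', '*'], true)
            else
              -- word2.split(li,1)[1] = word2.drop (find+len li): exact since li occurs in word2 and li ≠ "" (Pre_)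
              let w := st.1.drop ((PySem.Chars.find st.1 li).toNat + li.length)
              if i != (((letters_key.length + 1) / 2 : Nat) : Int) - 1 || letters_key.length % 2 == 0 then
                let ri := PySem.Chars.lower ((PySem.List.pyGetD letters_key (-(i + 1)) "").toList)
                if PySem.Chars.find w ri == -1 then (['*', '*'], true)
                else
                  -- w.rsplit(ri,1)[0] = w.take (rfind): exact since ri occurs in w and ri ≠ "" (Pre_)
                  (w.take (PySem.Chars.rfind w ri).toNat, false)
              else (w, false))
        (w2, false)
      if st.1 != ['*', '*'] then res ++ [word] else res) result

-- ===== PORT B =====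
-- greedy left-to-right matcher: B's inner `for pat in lowered` loop with its `break`
def pvConsume : List (List Char) → List Char → Bool
  | [], _ => true
  | p :: ps, w =>
    let pos := PySem.Chars.find w p
    if pos == -1 then false
    else pvConsume ps (PySem.List.slice w (some (pos + (p.length : Int))) none)

def letters_search_alt (word_list : List String) (key_element : List String) (result : List String) : List String :=
  let letters_key := key_element.filter (fun k => !(PySem.Str.isIn "?" k) && !(PySem.Str.isIn "*" k))
  if letters_key.length == 0 then
    let k0 := PySem.List.pyGetD key_element 0 ""
    if PySem.Str.isIn "*" k0 then
      if !(PySem.Str.isIn "?" k0) then word_list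
      else word_list.foldl (fun res w =>
        if PySem.Str.count k0 "?" ≤ PySem.Str.len w then res ++ [w] else res) result
    else
      word_list.foldl (fun res w =>
        if PySem.Str.len w == PySem.Str.len k0 then res ++ [w] else res) result
  else
    let lowered := letters_key.map (fun k => PySem.Chars.lower k.toList)
    let hd : Nat := PySem.Str.count (PySem.List.pyGetD key_element 0 "") "?"
    let tl : Nat := PySem.Str.count (PySem.List.pyGetD key_element (-1) "") "?"
    word_list.foldl (fun res word =>
      let w0 := PySem.Chars.lower word.toList
      let w1 := PySem.List.slice w0 (some ((hd : Nat) : Int)) none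
      let w2 := PySem.List.slice w1 none (some ((w1.length : Int) - (tl : Int)))
      if pvConsume lowered w2 then res ++ [word] else res) result

-- ===== PRECONDITION & SPEC =====
-- Pre_ excludes key_element = [] (key_element[0] raises IndexError) and key_element containing
-- the empty string "" (it lands in letters_key and word2.split("", 1) raises ValueError for any
-- word that reaches it; for uniformity all such inputs are excluded, including those where no
-- word reaches the split — e.g. an empty word_list — on which A still returns).
def Pre_letters_search (word_list : List String) (key_element : List String) (result : List String) : Prop :=
  key_element ≠ [] ∧ "" ∉ key_element
instance (word_list : List String) (key_element : List String) (result : List String) : Decidable (Pre_letters_search word_list key_element result) := by unfold Pre_letters_search; infer_instance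

def pvWitness_letters_search : List String × List String × List String := (["Bead", "xyz"], ["b", "?d"], [])

-- ---- the change region, stated on the input alone: it reads the input only through
-- port A's own input readers aLetters/aTrim and the placement scanner pvG ----
-- least end position of a disjoint in-order placement of `ps` inside `t` (none: no placement)
def pvG : List (List Char) → List Char → Option Nat
  | [], _ => some 0
  | p :: ps, t =>
    let a := (PySem.Chars.find t p).toNat + p.length
    if PySem.Chars.find t p < 0 then none else (pvG ps (t.drop a)).map (a + ·)

-- the trimmed word reads as: earliest-possible span of the first half of the key's letters,
-- then exactly "**", then latest-possible span of the second half (pvG on reversed text)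
def pvCollides (key : List String) (w : String) : Bool :=
  let ls := (aLetters key).map fun k => PySem.Chars.lower k.toList
  let h := (ls.length + 1) / 2
  let t := aTrim key w
  match pvG (ls.take h) t, pvG ((ls.drop h).reverse.map List.reverse) t.reverse with
  | some e, some m => (t.drop e).take (t.length - m - e) == ['*', '*']
  | _, _ => false

-- On inputs where some word — case-folded and '?'-trimmed — contains all key letters in order
-- while leaving exactly the two characters "**" between the extremal placements of the first and
-- second half of the letters, A confuses that leftover with its own skip sentinel and silently
-- drops the matching word; B returns it, which is the intended behaviour of the filter.
def D_letters_search (word_list : List String) (key_element : List String) (result : List String) : Prop :=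
  aLetters key_element ≠ [] ∧ word_list.any (pvCollides key_element) = true
instance (word_list : List String) (key_element : List String) (result : List String) : Decidable (D_letters_search word_list key_element result) := by unfold D_letters_search; infer_instance

def Spec_letters_search (word_list : List String) (key_element : List String) (result : List String) (out : List String) : Prop := ¬ D_letters_search word_list key_element result → out = letters_search_alt word_list key_element result
instance (word_list : List String) (key_element : List String) (result : List String) (out : List String) : Decidable (Spec_letters_search word_list key_element result out) := by unfold Spec_letters_search; infer_instance

def pvDiffWitness_letters_search : List String × List String × List String := (["a**"], ["a"], [])
def pvDiffWitnessOut_letters_search : (List String) × (List String) := ([], ["a**"])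

-- ===== CLAIM (what is proved, stated in full; the proofs are below) =====
def Claim_unchanged_letters_search : Prop := ∀ (word_list : List String) (key_element : List String) (result : List String), Dom_letters_search word_list key_element result → Pre_letters_search word_list key_element result → Spec_letters_search word_list key_element result (letters_search word_list key_element result)
def Claim_changed_letters_search : Prop := Dom_letters_search (pvDiffWitness_letters_search.1) (pvDiffWitness_letters_search.2.1) (pvDiffWitness_letters_search.2.2) ∧ Pre_letters_search (pvDiffWitness_letters_search.1) (pvDiffWitness_letters_search.2.1) (pvDiffWitness_letters_search.2.2) ∧ D_letters_search (pvDiffWitness_letters_search.1) (pvDiffWitness_letters_search.2.1) (pvDiffWitness_letters_search.2.2) ∧ letters_search (pvDiffWitness_letters_search.1) (pvDiffWitness_letters_search.2.1) (pvDiffWitness_letters_search.2.2) = pvDiffWitnessOut_letters_search.1 ∧ letters_search_alt (pvDiffWitness_letters_search.1) (pvDiffWitness_letters_search.2.1) (pvDiffWitness_letters_search.2.2) = pvDiffWitnessOut_letters_search.2 ∧ pvDiffWitnessOut_letters_search.1 ≠ pvDiffWitnessOut_letters_search.2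
def Claim_exact_letters_search : Prop := ∀ (word_list : List String) (key_element : List String) (result : List String), Dom_letters_search word_list key_element result → Pre_letters_search word_list key_element result → D_letters_search word_list key_element result → letters_search word_list key_element result ≠ letters_search_alt word_list key_element result

-- ===== LEMMAS AND PROOFS =====

-- ---- proof-side machinery: declarative ordered-occurrence and extremal placements ----
def pvOcc : List (List Char) → List Char → Bool
  | [], _ => true
  | p :: ps, t => (List.range (t.length + 1)).any fun i =>
      p.isPrefixOf (t.drop i) && pvOcc ps (t.drop (i + p.length))

def pvScanUp (p : Nat → Bool) (k : Nat) : Nat → Option Nat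
  | 0 => none
  | fuel + 1 => if p k then some k else pvScanUp p (k + 1) fuel

def pvScanDown (p : Nat → Bool) : Nat → Option Nat
  | 0 => if p 0 then some 0 else none
  | m + 1 => if p (m + 1) then some (m + 1) else pvScanDown p m

def pvMinEnd (L : List (List Char)) (t : List Char) : Option Nat :=
  pvScanUp (fun m => pvOcc L (t.take m)) 0 (t.length + 1)
def pvMaxStart (R : List (List Char)) (t : List Char) : Option Nat :=
  pvScanDown (fun m => pvOcc R (t.drop m)) t.length

theorem pvOcc_cons_iff {p : List Char} (hp : p ≠ []) (ps : List (List Char)) (t : List Char) :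
    pvOcc (p :: ps) t = true ↔ ∃ i, p <+: t.drop i ∧ pvOcc ps (t.drop (i + p.length)) = true := by
  simp only [pvOcc, List.any_eq_true, List.mem_range, List.isPrefixOf_iff_prefix, Bool.and_eq_true]
  constructor
  · rintro ⟨i, _, hpre, hocc⟩; exact ⟨i, hpre, hocc⟩
  · rintro ⟨i, hpre, hocc⟩
    refine ⟨i, ?_, hpre, hocc⟩
    by_contra hlt
    have : t.drop i = [] := List.drop_eq_nil_of_le (by omega)
    rw [this] at hpre
    exact hp (List.prefix_nil.mp hpre)

theorem pvOcc_append_right (ps : List (List Char)) (t u : List Char)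
    (h : pvOcc ps t = true) : pvOcc ps (t ++ u) = true := by
  induction ps generalizing t with
  | nil => rfl
  | cons p ps ih =>
    simp only [pvOcc, List.any_eq_true, List.mem_range, Bool.and_eq_true,
      List.isPrefixOf_iff_prefix] at h ⊢
    obtain ⟨i, hi, hpre, hocc⟩ := h
    have hip : i + p.length ≤ t.length := by
      have := hpre.length_le
      simp [List.length_drop] at this
      omega
    have e1 : i - t.length = 0 := by omega
    have e2 : i + p.length - t.length = 0 := by omega
    refine ⟨i, by simp; omega, ?_, ?_⟩
    · rw [List.drop_append, e1, List.drop_zero]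
      exact hpre.trans (List.prefix_append _ _)
    · rw [List.drop_append, e2, List.drop_zero]
      exact ih _ hocc

theorem pvOcc_append_left (ps : List (List Char)) (t u : List Char)
    (h : pvOcc ps t = true) : pvOcc ps (u ++ t) = true := by
  induction ps generalizing t u with
  | nil => rfl
  | cons p ps ih =>
    simp only [pvOcc, List.any_eq_true, List.mem_range, Bool.and_eq_true,
      List.isPrefixOf_iff_prefix] at h ⊢
    obtain ⟨i, hi, hpre, hocc⟩ := h
    have e1 : u.length + i - u.length = i := by omega
    have e2 : u.length + i + p.length - u.length = i + p.length := by omega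
    refine ⟨u.length + i, by simp; omega, ?_, ?_⟩
    · rw [List.drop_append, List.drop_eq_nil_of_le (by omega), e1]
      simpa using hpre
    · rw [List.drop_append, List.drop_eq_nil_of_le (by omega), e2]
      simpa using hocc

theorem pvOcc_of_take {ps : List (List Char)} {t : List Char} {k : Nat}
    (h : pvOcc ps (t.take k) = true) : pvOcc ps t = true := by
  have := pvOcc_append_right ps (t.take k) (t.drop k) h
  rwa [List.take_append_drop] at this

theorem pvOcc_of_drop {ps : List (List Char)} {t : List Char} {k : Nat}
    (h : pvOcc ps (t.drop k) = true) : pvOcc ps t = true := by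
  have := pvOcc_append_left ps (t.drop k) (t.take k) h
  rwa [List.take_append_drop] at this

theorem pvOcc_take_mono {ps : List (List Char)} {t : List Char} {m m' : Nat} (hmm : m ≤ m')
    (h : pvOcc ps (t.take m) = true) : pvOcc ps (t.take m') = true := by
  have h2 := pvOcc_append_right ps (t.take m) ((t.drop m).take (m' - m)) h
  rwa [← List.take_add, Nat.add_sub_cancel' hmm] at h2

theorem pvOcc_drop_anti {ps : List (List Char)} {t : List Char} {m m' : Nat} (hmm : m ≤ m')
    (h : pvOcc ps (t.drop m') = true) : pvOcc ps (t.drop m) = true := by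
  have : t.drop m' = (t.drop m).drop (m' - m) := by
    rw [List.drop_drop]; congr 1; omega
  rw [this] at h
  exact pvOcc_of_drop h



theorem pvScanUp_eq_some {p : Nat → Bool} {k fuel m : Nat} :
    pvScanUp p k fuel = some m ↔
      k ≤ m ∧ m < k + fuel ∧ p m = true ∧ ∀ j, k ≤ j → j < m → p j = false := by
  induction fuel generalizing k with
  | zero => simp [pvScanUp]; omega
  | succ fuel ih =>
    cases hk : p k with
    | true =>
      simp only [pvScanUp, hk, if_true, Option.some_inj]
      constructor
      · rintro rfl; exact ⟨le_refl _, by omega, hk, fun j h1 h2 => by omega⟩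
      · rintro ⟨h1, _, hm, hmin⟩
        rcases Nat.eq_or_lt_of_le h1 with rfl | hlt
        · rfl
        · exact absurd hk (by simp [hmin k (le_refl _) hlt])
    | false =>
      simp only [pvScanUp, hk, Bool.false_eq_true, if_false, ih]
      constructor
      · rintro ⟨h1, h2, hm, hmin⟩
        refine ⟨by omega, by omega, hm, fun j hj1 hj2 => ?_⟩
        rcases Nat.eq_or_lt_of_le hj1 with rfl | hlt
        · exact hk
        · exact hmin j hlt hj2
      · rintro ⟨h1, h2, hm, hmin⟩
        have hne : k ≠ m := by rintro rfl; rw [hm] at hk; cases hk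
        exact ⟨by omega, by omega, hm, fun j hj1 hj2 => hmin j (by omega) hj2⟩

theorem pvScanUp_eq_none {p : Nat → Bool} {k fuel : Nat} :
    pvScanUp p k fuel = none ↔ ∀ j, k ≤ j → j < k + fuel → p j = false := by
  induction fuel generalizing k with
  | zero => simp [pvScanUp]; omega
  | succ fuel ih =>
    cases hk : p k with
    | true =>
      simp only [pvScanUp, hk, if_true]
      constructor
      · intro h; cases h
      · intro h; have := h k (le_refl _) (by omega); rw [hk] at this; cases this
    | false =>
      simp only [pvScanUp, hk, Bool.false_eq_true, if_false, ih]
      constructor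
      · intro h j hj1 hj2
        rcases Nat.eq_or_lt_of_le hj1 with rfl | hlt
        · exact hk
        · exact h j hlt (by omega)
      · intro h j hj1 hj2; exact h j (by omega) (by omega)

theorem pvScanDown_eq_some {p : Nat → Bool} {n s : Nat} :
    pvScanDown p n = some s ↔ s ≤ n ∧ p s = true ∧ ∀ j, s < j → j ≤ n → p j = false := by
  induction n with
  | zero =>
    cases h : p 0 with
    | true =>
      simp only [pvScanDown, h, if_true, Option.some_inj]
      constructor
      · rintro rfl; exact ⟨le_refl _, h, fun j h1 h2 => by omega⟩
      · rintro ⟨h1, h2, _⟩; omega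
    | false =>
      simp only [pvScanDown, h, Bool.false_eq_true, if_false]
      constructor
      · intro hh; cases hh
      · rintro ⟨h1, h2, _⟩; interval_cases s; rw [h2] at h; cases h
  | succ n ih =>
    cases hk : p (n + 1) with
    | true =>
      simp only [pvScanDown, hk, if_true, Option.some_inj]
      constructor
      · rintro rfl; exact ⟨le_refl _, hk, fun j h1 h2 => by omega⟩
      · rintro ⟨h1, hm, hmax⟩
        rcases Nat.eq_or_lt_of_le h1 with rfl | hlt
        · rfl
        · exact absurd hk (by simp [hmax (n+1) hlt (le_refl _)])
    | false =>
      simp only [pvScanDown, hk, Bool.false_eq_true, if_false, ih]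
      constructor
      · rintro ⟨h1, hm, hmax⟩
        refine ⟨by omega, hm, fun j hj1 hj2 => ?_⟩
        rcases Nat.eq_or_lt_of_le hj2 with rfl | hlt
        · exact hk
        · exact hmax j hj1 (by omega)
      · rintro ⟨h1, hm, hmax⟩
        have hne : s ≠ n + 1 := by rintro rfl; rw [hm] at hk; cases hk
        exact ⟨by omega, hm, fun j hj1 hj2 => hmax j hj1 (by omega)⟩

theorem pvScanDown_eq_none {p : Nat → Bool} {n : Nat} :
    pvScanDown p n = none ↔ ∀ j, j ≤ n → p j = false := by
  induction n with
  | zero =>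
    cases h : p 0 with
    | true =>
      simp only [pvScanDown, h, if_true]
      constructor
      · intro hh; cases hh
      · intro hh; have := hh 0 (le_refl _); rw [h] at this; cases this
    | false =>
      simp only [pvScanDown, h, Bool.false_eq_true, if_false]
      refine ⟨fun _ j hj => ?_, fun _ => trivial⟩
      interval_cases j; exact h
  | succ n ih =>
    cases hk : p (n + 1) with
    | true =>
      simp only [pvScanDown, hk, if_true]
      constructor
      · intro hh; cases hh
      · intro hh; have := hh (n+1) (le_refl _); rw [hk] at this; cases this
    | false =>
      simp only [pvScanDown, hk, Bool.false_eq_true, if_false, ih]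
      constructor
      · intro h j hj
        rcases Nat.eq_or_lt_of_le hj with rfl | hlt
        · exact hk
        · exact h j (by omega)
      · intro h j hj; exact h j (by omega)

theorem pvMinEnd_eq_some {L : List (List Char)} {t : List Char} {e : Nat} :
    pvMinEnd L t = some e ↔
      e ≤ t.length ∧ pvOcc L (t.take e) = true ∧ ∀ m < e, pvOcc L (t.take m) = false := by
  rw [pvMinEnd, pvScanUp_eq_some]
  constructor
  · rintro ⟨_, h2, h3, h4⟩; exact ⟨by omega, h3, fun m hm => h4 m (by omega) hm⟩
  · rintro ⟨h1, h2, h3⟩; exact ⟨by omega, by omega, h2, fun j _ hj => h3 j hj⟩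

theorem pvMinEnd_eq_none {L : List (List Char)} {t : List Char} :
    pvMinEnd L t = none ↔ pvOcc L t = false := by
  rw [pvMinEnd, pvScanUp_eq_none]
  constructor
  · intro h
    have := h t.length (by omega) (by omega)
    rwa [List.take_length] at this
  · intro h j _ _
    by_cases hj : pvOcc L (t.take j) = true
    · exact absurd (pvOcc_of_take hj) (by simp [h])
    · simpa using hj

theorem pvMaxStart_eq_some {R : List (List Char)} {t : List Char} {s : Nat} :
    pvMaxStart R t = some s ↔
      s ≤ t.length ∧ pvOcc R (t.drop s) = true ∧ ∀ m, s < m → m ≤ t.length → pvOcc R (t.drop m) = false := by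
  rw [pvMaxStart, pvScanDown_eq_some]

theorem pvMaxStart_eq_none {R : List (List Char)} {t : List Char} :
    pvMaxStart R t = none ↔ pvOcc R t = false := by
  rw [pvMaxStart, pvScanDown_eq_none]
  constructor
  · intro h
    have := h 0 (by omega)
    rwa [List.drop_zero] at this
  · intro h j _
    by_cases hj : pvOcc R (t.drop j) = true
    · exact absurd (pvOcc_of_drop hj) (by simp [h])
    · simpa using hj

-- ---- find / rfind facts ----
theorem pvFind_neg_iff (s sub : List Char) : PySem.Chars.find s sub < 0 ↔ ¬ sub <:+: s := by
  rw [← PySem.Chars.find_eq_neg_one_iff]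
  have := PySem.Chars.neg_one_le_find s sub
  omega

theorem pvInfix_iff_exists_drop (sub s : List Char) : sub <:+: s ↔ ∃ j, sub <+: s.drop j := by
  rw [← PySem.Chars.isIn_iff_infix, ← PySem.Chars.exists_prefix_drop_iff_isIn]

theorem pvPrefix_drop_infix {sub s : List Char} {j : Nat} (h : sub <+: s.drop j) : sub <:+: s :=
  (pvInfix_iff_exists_drop sub s).mpr ⟨j, h⟩

theorem pvRfind_go_spec (s sub : List Char) : ∀ j : Nat,
    (PySem.Chars.rfind.go s sub j = -1 ∧ ∀ i ≤ j, ¬ sub <+: s.drop i) ∨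
    (∃ m : Nat, PySem.Chars.rfind.go s sub j = (m : Int) ∧ m ≤ j ∧ sub <+: s.drop m ∧
      ∀ i, m < i → i ≤ j → ¬ sub <+: s.drop i) := by
  intro j
  induction j with
  | zero =>
    by_cases h : sub.isPrefixOf s = true
    · right
      refine ⟨0, ?_, le_refl _, by simpa [List.isPrefixOf_iff_prefix] using h, fun i h1 h2 => by omega⟩
      simp [PySem.Chars.rfind.go, h]
    · left
      constructor
      · simp [PySem.Chars.rfind.go, h]
      · intro i hi
        interval_cases i
        simpa [List.isPrefixOf_iff_prefix] using h
  | succ j ih =>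
    by_cases h : sub.isPrefixOf (s.drop (j + 1)) = true
    · right
      refine ⟨j + 1, ?_, le_refl _, by simpa [List.isPrefixOf_iff_prefix] using h,
        fun i h1 h2 => by omega⟩
      simp [PySem.Chars.rfind.go, h]
    · have hgo : PySem.Chars.rfind.go s sub (j + 1) = PySem.Chars.rfind.go s sub j := by
        simp [PySem.Chars.rfind.go, h]
      have hnp : ¬ sub <+: s.drop (j + 1) := by
        simpa [List.isPrefixOf_iff_prefix] using h
      rcases ih with ⟨h1, h2⟩ | ⟨m, h1, h2, h3, h4⟩
      · left
        refine ⟨by rw [hgo]; exact h1, fun i hi => ?_⟩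
        rcases Nat.lt_or_ge i (j + 1) with hlt | hge
        · exact h2 i (by omega)
        · have : i = j + 1 := by omega
          rw [this]; exact hnp
      · right
        refine ⟨m, by rw [hgo]; exact h1, by omega, h3, fun i hi1 hi2 => ?_⟩
        rcases Nat.lt_or_ge i (j + 1) with hlt | hge
        · exact h4 i hi1 (by omega)
        · have : i = j + 1 := by omega
          rw [this]; exact hnp

theorem pvRfind_spec_of_infix {s q : List Char} (hq : q ≠ []) (h : q <:+: s) :
    ∃ k : Nat, PySem.Chars.rfind s q = (k : Int) ∧ k ≤ s.length ∧ q <+: s.drop k ∧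
      ∀ i, k < i → ¬ q <+: s.drop i := by
  obtain ⟨j, hj⟩ := (pvInfix_iff_exists_drop q s).mp h
  have hjlen : j ≤ s.length := by
    by_contra hgt
    rw [List.drop_eq_nil_of_le (by omega)] at hj
    exact hq (List.prefix_nil.mp hj)
  rcases pvRfind_go_spec s q s.length with ⟨_, h2⟩ | ⟨m, h1, h2, h3, h4⟩
  · exact absurd hj (h2 j hjlen)
  · refine ⟨m, h1, h2, h3, fun i hi => ?_⟩
    rcases Nat.lt_or_ge s.length i with hlt | hge
    · intro hpre
      rw [List.drop_eq_nil_of_le (by omega)] at hpre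
      exact hq (List.prefix_nil.mp hpre)
    · exact h4 i hi hge

-- ---- splitting an ordered occurrence ----
theorem pvOcc_append_iff {L : List (List Char)} (hL : ∀ p ∈ L, p ≠ []) (R : List (List Char))
    (t : List Char) :
    pvOcc (L ++ R) t = true ↔ ∃ m ≤ t.length, pvOcc L (t.take m) = true ∧ pvOcc R (t.drop m) = true := by
  induction L generalizing t with
  | nil =>
    simp only [List.nil_append]
    constructor
    · intro h; exact ⟨0, by omega, rfl, by simpa using h⟩
    · rintro ⟨m, _, _, h⟩; exact pvOcc_of_drop h
  | cons p L ih =>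
    have hp : p ≠ [] := hL p (by simp)
    have hL' : ∀ r ∈ L, r ≠ [] := fun r hr => hL r (by simp [hr])
    rw [List.cons_append, pvOcc_cons_iff hp, ]
    constructor
    · rintro ⟨i, hpre, hocc⟩
      obtain ⟨m', hm', h1, h2⟩ := (ih hL' _).mp hocc
      set a := i + p.length with ha
      have hplen : p.length ≤ t.length - i := by simpa using hpre.length_le
      have hilen : i < t.length ∨ p.length = 0 := by
        by_cases hi : i < t.length
        · exact Or.inl hi
        · right
          have : t.drop i = [] := List.drop_eq_nil_of_le (by omega)
          rw [this] at hpre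
          simpa using List.prefix_nil.mp hpre
      have hp0 : p.length ≠ 0 := fun h0 => hp (List.eq_nil_of_length_eq_zero h0)
      have hm'' : m' ≤ t.length - a := by simpa using hm'
      refine ⟨a + m', by omega, ?_, ?_⟩
      · rw [pvOcc_cons_iff hp]
        refine ⟨i, ?_, ?_⟩
        · rw [List.drop_take, List.prefix_take_iff]
          exact ⟨hpre, by omega⟩
        · rw [List.drop_take, ← ha]
          have : a + m' - a = m' := by omega
          rw [this]
          exact h1
      · rw [← List.drop_drop]
        exact h2
    · rintro ⟨m, hm, h1, h2⟩
      rw [pvOcc_cons_iff hp] at h1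
      obtain ⟨i, hpre, hocc⟩ := h1
      set a := i + p.length with ha
      rw [List.drop_take, List.prefix_take_iff] at hpre
      have hp0 : p.length ≠ 0 := fun h0 => hp (List.eq_nil_of_length_eq_zero h0)
      have him : i ≤ m := by
        rcases hpre with ⟨hpre1, hpre2⟩
        by_contra hgt
        omega
      have halem : a ≤ m := by
        have := hpre.2
        omega
      refine ⟨i, hpre.1, ?_⟩
      apply (ih hL' _).mpr
      have hmm : m - a ≤ (t.drop a).length := by simp; omega
      refine ⟨m - a, hmm, ?_, ?_⟩
      · have h0 : (t.take m).drop a = (t.drop a).take (m - a) := List.drop_take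
        rw [h0] at hocc
        exact hocc
      · rw [List.drop_drop]
        have : a + (m - a) = m := by omega
        rw [this]
        exact h2

theorem pvOcc_snoc_iff {R : List (List Char)} (hR : ∀ p ∈ R, p ≠ []) {q : List Char} (hq : q ≠ [])
    (t : List Char) :
    pvOcc (R ++ [q]) t = true ↔ ∃ j, q <+: t.drop j ∧ pvOcc R (t.take j) = true := by
  rw [pvOcc_append_iff hR [q] t]
  constructor
  · rintro ⟨m, hm, h1, h2⟩
    rw [pvOcc_cons_iff hq] at h2
    obtain ⟨i, hpre, -⟩ := h2
    rw [List.drop_drop] at hpre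
    exact ⟨m + i, hpre, pvOcc_take_mono (by omega) h1⟩
  · rintro ⟨j, hpre, h1⟩
    have hjlen : j < t.length := by
      by_contra hgt
      rw [List.drop_eq_nil_of_le (by omega)] at hpre
      exact hq (List.prefix_nil.mp hpre)
    refine ⟨j, by omega, h1, ?_⟩
    rw [pvOcc_cons_iff hq]
    exact ⟨0, by simpa using hpre, rfl⟩

theorem pvOcc_iff_minmax {L : List (List Char)} (hL : ∀ p ∈ L, p ≠ []) (R : List (List Char))
    (t : List Char) :
    pvOcc (L ++ R) t = true ↔
      ∃ e s, pvMinEnd L t = some e ∧ pvMaxStart R t = some s ∧ e ≤ s := by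
  rw [pvOcc_append_iff hL R t]
  constructor
  · rintro ⟨m, hm, h1, h2⟩
    have hne : pvMinEnd L t ≠ none := by
      rw [Ne, pvMinEnd_eq_none]
      simp [pvOcc_of_take h1]
    have hns : pvMaxStart R t ≠ none := by
      rw [Ne, pvMaxStart_eq_none]
      simp [pvOcc_of_drop h2]
    obtain ⟨e, he⟩ := Option.ne_none_iff_exists'.mp hne
    obtain ⟨ss, hs⟩ := Option.ne_none_iff_exists'.mp hns
    refine ⟨e, ss, he, hs, ?_⟩
    rw [pvMinEnd_eq_some] at he
    rw [pvMaxStart_eq_some] at hs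
    have hem : e ≤ m := by
      by_contra hgt
      have := he.2.2 m (by omega)
      rw [h1] at this; cases this
    have hms : m ≤ ss := by
      by_contra hgt
      have := hs.2.2 m (by omega) hm
      rw [h2] at this; cases this
    omega
  · rintro ⟨e, ss, he, hs, hes⟩
    rw [pvMinEnd_eq_some] at he
    rw [pvMaxStart_eq_some] at hs
    exact ⟨e, he.1, he.2.1, pvOcc_drop_anti hes hs.2.1⟩

-- ---- the leftmost step shifts the minimal end ----
theorem pvMinEnd_cons_neg {p : List Char} (hp : p ≠ []) (L : List (List Char)) (t : List Char)
    (hfind : PySem.Chars.find t p < 0) : pvMinEnd (p :: L) t = none := by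
  rw [pvMinEnd_eq_none]
  by_contra h
  have h' : pvOcc (p :: L) t = true := by simpa using h
  obtain ⟨i, hpre, -⟩ := (pvOcc_cons_iff hp L t).mp h'
  exact (pvFind_neg_iff t p).mp hfind (pvPrefix_drop_infix hpre)

theorem pvMinEnd_cons {p : List Char} (hp : p ≠ []) (L : List (List Char)) (t : List Char)
    (hfind : 0 ≤ PySem.Chars.find t p) :
    pvMinEnd (p :: L) t =
      (pvMinEnd L (t.drop ((PySem.Chars.find t p).toNat + p.length))).map
        (fun e => (PySem.Chars.find t p).toNat + p.length + e) := by
  obtain ⟨hpre, hmin⟩ := PySem.Chars.find_spec hfind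
  set j := (PySem.Chars.find t p).toNat with hj
  set a := j + p.length with ha
  have hp0 : p.length ≠ 0 := fun h0 => hp (List.eq_nil_of_length_eq_zero h0)
  have hplen : p.length ≤ t.length - j := by simpa using hpre.length_le
  have hjlen : j < t.length := by
    by_contra hge
    rw [List.drop_eq_nil_of_le (by omega)] at hpre
    exact hp (List.prefix_nil.mp hpre)
  have halen : a ≤ t.length := by omega
  cases hres : pvMinEnd L (t.drop a) with
  | none =>
    rw [pvMinEnd_eq_none] at hres
    simp only [Option.map_none]
    rw [pvMinEnd_eq_none]
    by_contra h
    have h' : pvOcc (p :: L) t = true := by simpa using h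
    obtain ⟨i, hprei, hocci⟩ := (pvOcc_cons_iff hp L t).mp h'
    have hij : j ≤ i := by
      by_contra hlt
      exact hmin i (by omega) hprei
    have : pvOcc L (t.drop a) = true := pvOcc_drop_anti (by omega) (pvOcc_drop_anti (le_refl _) hocci)
    rw [hres] at this; cases this
  | some e' =>
    rw [pvMinEnd_eq_some] at hres
    obtain ⟨he1, he2, he3⟩ := hres
    have he1' : e' ≤ t.length - a := by simpa using he1
    simp only [Option.map_some]
    rw [pvMinEnd_eq_some]
    refine ⟨by omega, ?_, ?_⟩
    · rw [pvOcc_cons_iff hp]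
      refine ⟨j, ?_, ?_⟩
      · rw [List.drop_take, List.prefix_take_iff]
        exact ⟨hpre, by omega⟩
      · rw [List.drop_take, ← ha]
        have : a + e' - a = e' := by omega
        rw [this]
        exact he2
    · intro m hm
      by_contra hcon
      have hcon' : pvOcc (p :: L) (t.take m) = true := by simpa using hcon
      obtain ⟨i, hprei, hocci⟩ := (pvOcc_cons_iff hp L (t.take m)).mp hcon'
      rw [List.drop_take, List.prefix_take_iff] at hprei
      have hij : j ≤ i := by
        by_contra hlt
        exact hmin i (by omega) hprei.1
      have him : i + p.length ≤ m := by
        have := hprei.2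
        omega
      rw [List.drop_take] at hocci
      have hocc2 : pvOcc L (((t.drop a).take (m - a)).drop (i + p.length - a)) = true := by
        rw [List.drop_take, List.drop_drop]
        have : a + (i + p.length - a) = i + p.length := by omega
        rw [this]
        have : m - a - (i + p.length - a) = m - (i + p.length) := by omega
        rw [this]
        exact hocci
      have hocc3 : pvOcc L ((t.drop a).take (m - a)) = true := pvOcc_of_drop hocc2
      have := he3 (m - a) (by omega)
      rw [hocc3] at this; cases this

-- ---- the greedy scanner pvG computes the minimal end ----
theorem pvG_eq_minEnd {ps : List (List Char)} (hps : ∀ p ∈ ps, p ≠ []) (t : List Char) :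
    pvG ps t = pvMinEnd ps t := by
  induction ps generalizing t with
  | nil =>
    simp only [pvG]
    rw [eq_comm, pvMinEnd_eq_some]
    exact ⟨by omega, rfl, fun m hm => by omega⟩
  | cons p ps ih =>
    have hp : p ≠ [] := hps p (by simp)
    have hps' : ∀ r ∈ ps, r ≠ [] := fun r hr => hps r (by simp [hr])
    by_cases hf : PySem.Chars.find t p < 0
    · rw [pvMinEnd_cons_neg hp ps t hf]
      simp [pvG, hf]
    · have hf' : 0 ≤ PySem.Chars.find t p := by omega
      rw [pvMinEnd_cons hp ps t hf']
      simp only [pvG]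
      rw [if_neg hf, ih hps']

-- ---- occurrence is reversal-symmetric ----
theorem pvOcc_reverse {ps : List (List Char)} (hps : ∀ p ∈ ps, p ≠ []) (t : List Char) :
    pvOcc (ps.reverse.map List.reverse) t.reverse = pvOcc ps t := by
  induction ps using List.reverseRecOn generalizing t with
  | nil => rfl
  | append_singleton ps q ih =>
    have hq : q ≠ [] := hps q (by simp)
    have hq' : q.reverse ≠ [] := by simpa using hq
    have hps' : ∀ r ∈ ps, r ≠ [] := fun r hr => hps r (by simp [hr])
    have hq0 : q.length ≠ 0 := fun h0 => hq (List.eq_nil_of_length_eq_zero h0)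
    rw [Bool.eq_iff_iff]
    rw [show (ps ++ [q]).reverse.map List.reverse = q.reverse :: ps.reverse.map List.reverse by simp]
    rw [pvOcc_cons_iff hq', pvOcc_snoc_iff hps' hq]
    constructor
    · rintro ⟨i, hpre, hocc⟩
      have hilen : i < t.length := by
        by_contra hge
        rw [List.drop_eq_nil_of_le (by simpa using hge)] at hpre
        exact hq' (List.prefix_nil.mp hpre)
      set c := t.length - i with hc
      rw [List.drop_reverse] at hpre
      have hsuf : q <:+ t.take c := by
        rw [← List.reverse_prefix]
        simpa using hpre
      have hqc : q.length ≤ c := by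
        have := hsuf.length_le
        simp [hc] at this ⊢
        omega
      refine ⟨c - q.length, ?_, ?_⟩
      · have hlen : (t.take c).length = c := by simp [hc]
        rw [List.suffix_iff_eq_drop, hlen, List.drop_take] at hsuf
        have hnum : c - (c - q.length) = q.length := by omega
        rw [hnum] at hsuf
        have h2 := List.take_prefix q.length (t.drop (c - q.length))
        rwa [← hsuf] at h2
      · have harg : t.reverse.drop (i + q.reverse.length) = (t.take (c - q.length)).reverse := by
          rw [List.drop_reverse]
          congr 1
          simp [hc]
          omega
        rw [harg, ih hps'] at hocc
        exact hocc
    · rintro ⟨j, hpre, hocc⟩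
      have hjq : j + q.length ≤ t.length := by
        have := hpre.length_le
        simp at this
        omega
      refine ⟨t.length - (j + q.length), ?_, ?_⟩
      · have hnum2 : t.length - (t.length - (j + q.length)) = j + q.length := by omega
        have harg : t.reverse.drop (t.length - (j + q.length)) = (t.take (j + q.length)).reverse := by
          rw [List.drop_reverse, hnum2]
        rw [harg, List.reverse_prefix, List.take_add]
        rw [show List.take q.length (t.drop j) = q from (List.prefix_iff_eq_take.mp hpre).symm]
        exact List.suffix_append _ _
      · have harg : t.reverse.drop (t.length - (j + q.length) + q.reverse.length) = (t.take j).reverse := by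
          rw [List.drop_reverse]
          congr 1
          simp
          omega
        rw [harg, ih hps']
        exact hocc

-- ---- the maximal start via pvG on the reversed text ----
theorem pvMaxStart_eq_reverse {ps : List (List Char)} (hps : ∀ p ∈ ps, p ≠ []) (t : List Char) :
    pvMaxStart ps t = (pvMinEnd (ps.reverse.map List.reverse) t.reverse).map (fun m => t.length - m) := by
  cases hres : pvMinEnd (ps.reverse.map List.reverse) t.reverse with
  | none =>
    rw [pvMinEnd_eq_none, pvOcc_reverse hps] at hres
    simp only [Option.map_none]
    rw [pvMaxStart_eq_none]
    exact hres
  | some m =>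
    rw [pvMinEnd_eq_some] at hres
    obtain ⟨h1, h2, h3⟩ := hres
    have h1' : m ≤ t.length := by simpa using h1
    simp only [Option.map_some]
    rw [pvMaxStart_eq_some]
    refine ⟨by omega, ?_, ?_⟩
    · have harg : t.reverse.take m = (t.drop (t.length - m)).reverse := by
        rw [List.reverse_drop]
        congr 1
        omega
      rw [harg, pvOcc_reverse hps] at h2
      exact h2
    · intro s' hs1 hs2
      by_contra hcon
      have hcon' : pvOcc ps (t.drop s') = true := by simpa using hcon
      have : pvOcc (ps.reverse.map List.reverse) (t.reverse.take (t.length - s')) = true := by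
        have harg : t.reverse.take (t.length - s') = (t.drop s').reverse := by
          rw [List.reverse_drop]
        rw [harg, pvOcc_reverse hps]
        exact hcon'
      have hx := h3 (t.length - s') (by omega)
      rw [hx] at this
      simp at this

-- ---- B's greedy loop decides ordered occurrence ----
theorem pvConsume_eq_occ {ps : List (List Char)} (hps : ∀ p ∈ ps, p ≠ []) (t : List Char) :
    pvConsume ps t = pvOcc ps t := by
  induction ps generalizing t with
  | nil => rfl
  | cons p ps ih =>
    have hp : p ≠ [] := hps p (by simp)
    have hps' : ∀ r ∈ ps, r ≠ [] := fun r hr => hps r (by simp [hr])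
    by_cases hf : PySem.Chars.find t p = -1
    · have hneg : PySem.Chars.find t p < 0 := by omega
      have hlhs : pvConsume (p :: ps) t = false := by
        simp [pvConsume, hf]
      rw [hlhs, eq_comm]
      rw [Bool.eq_false_iff]
      intro hocc
      obtain ⟨i, hpre, -⟩ := (pvOcc_cons_iff hp ps t).mp hocc
      exact (pvFind_neg_iff t p).mp hneg (pvPrefix_drop_infix hpre)
    · have hpos : 0 ≤ PySem.Chars.find t p := by
        have := PySem.Chars.neg_one_le_find t p
        omega
      obtain ⟨hpre, hmin⟩ := PySem.Chars.find_spec hpos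
      set j := (PySem.Chars.find t p).toNat with hj
      have hslice : PySem.List.slice t (some (PySem.Chars.find t p + (p.length : Int))) none =
          t.drop (j + p.length) := by
        rw [PySem.List.slice_from t (by omega)]
        congr 1
        omega
      have hbeq : (PySem.Chars.find t p == -1) = false := by
        simp [hf]
      simp only [pvConsume, hbeq, Bool.false_eq_true, if_false, hslice]
      rw [ih hps']
      rw [eq_comm, Bool.eq_iff_iff]
      constructor
      · intro hocc
        obtain ⟨i, hprei, hocci⟩ := (pvOcc_cons_iff hp ps t).mp hocc
        have hij : j ≤ i := by
          by_contra hlt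
          exact hmin i (by omega) hprei
        exact pvOcc_drop_anti (by omega) hocci
      · intro hocc
        exact (pvOcc_cons_iff hp ps t).mpr ⟨j, hpre, hocc⟩

-- ---- A's inner loop, on the case-folded letters list, and its closed form ----
def pvBody (ls : List (List Char)) (st : List Char × Bool) (i : Int) : List Char × Bool :=
  if st.2 then st
  else
    let li := PySem.List.pyGetD ls i []
    if PySem.Chars.find st.1 li == -1 then (['*', '*'], true)
    else
      let w := st.1.drop ((PySem.Chars.find st.1 li).toNat + li.length)
      if i != (((ls.length + 1) / 2 : Nat) : Int) - 1 || ls.length % 2 == 0 then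
        let ri := PySem.List.pyGetD ls (-(i + 1)) []
        if PySem.Chars.find w ri == -1 then (['*', '*'], true)
        else (w.take (PySem.Chars.rfind w ri).toNat, false)
      else (w, false)

def pvLoopA (ls : List (List Char)) (t : List Char) : List Char × Bool :=
  (PySem.List.pyRange 0 (((ls.length + 1) / 2 : Nat) : Int) 1).foldl (pvBody ls) (t, false)

def pvForm (ls : List (List Char)) (t : List Char) : List Char × Bool :=
  match pvMinEnd (ls.take ((ls.length + 1) / 2)) t, pvMaxStart (ls.drop ((ls.length + 1) / 2)) t with
  | some e, some s => if e ≤ s then ((t.drop e).take (s - e), false) else (['*', '*'], true)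
  | _, _ => (['*', '*'], true)

theorem pvForm_some_some {ls : List (List Char)} {t : List Char} {e s : Nat}
    (hM : pvMinEnd (ls.take ((ls.length + 1) / 2)) t = some e)
    (hS : pvMaxStart (ls.drop ((ls.length + 1) / 2)) t = some s) :
    pvForm ls t = if e ≤ s then ((t.drop e).take (s - e), false) else (['*', '*'], true) := by
  unfold pvForm
  rw [hM, hS]

theorem pvForm_none_left {ls : List (List Char)} {t : List Char}
    (hM : pvMinEnd (ls.take ((ls.length + 1) / 2)) t = none) :
    pvForm ls t = (['*', '*'], true) := by
  unfold pvForm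
  rw [hM]

theorem pvForm_none_right {ls : List (List Char)} {t : List Char}
    (hS : pvMaxStart (ls.drop ((ls.length + 1) / 2)) t = none) :
    pvForm ls t = (['*', '*'], true) := by
  unfold pvForm
  rw [hS]
  cases pvMinEnd (ls.take ((ls.length + 1) / 2)) t <;> rfl

-- truncating the text on the right does not move an existing minimal end
theorem pvMinEnd_take_of_le {L : List (List Char)} {x : List Char} {k e : Nat}
    (h : pvMinEnd L x = some e) (hek : e ≤ k) : pvMinEnd L (x.take k) = some e := by
  rw [pvMinEnd_eq_some] at h ⊢
  obtain ⟨h1, h2, h3⟩ := h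
  refine ⟨by simp; omega, ?_, ?_⟩
  · rw [List.take_take, min_eq_left hek]
    exact h2
  · intro m hm
    rw [List.take_take, min_eq_left (by omega)]
    exact h3 m hm

theorem pvMinEnd_of_take {L : List (List Char)} {x : List Char} {k e : Nat}
    (h : pvMinEnd L (x.take k) = some e) : pvMinEnd L x = some e := by
  rw [pvMinEnd_eq_some] at h ⊢
  obtain ⟨h1, h2, h3⟩ := h
  have hek : e ≤ k := by simp at h1; omega
  have hex : e ≤ x.length := by simp at h1; omega
  refine ⟨hex, ?_, ?_⟩
  · rw [List.take_take, min_eq_left hek] at h2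
    exact h2
  · intro m hm
    have := h3 m hm
    rwa [List.take_take, min_eq_left (by omega)] at this

-- the two-ended first step, on the closed form
theorem pvForm_step (p q : List Char) (mid : List (List Char)) (hp : p ≠ []) (hq : q ≠ [])
    (hmid : ∀ r ∈ mid, r ≠ []) (t : List Char) :
    pvForm (p :: (mid ++ [q])) t =
      if PySem.Chars.find t p < 0 then (['*', '*'], true)
      else if PySem.Chars.find (t.drop ((PySem.Chars.find t p).toNat + p.length)) q < 0 then
        (['*', '*'], true)
      else
        pvForm mid ((t.drop ((PySem.Chars.find t p).toNat + p.length)).take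
          ((PySem.Chars.rfind (t.drop ((PySem.Chars.find t p).toNat + p.length)) q).toNat)) := by
  have hmid' : ∀ r ∈ mid, r ≠ [] := hmid
  set n := mid.length + 2 with hn
  have hlen : (p :: (mid ++ [q])).length = n := by simp [hn]
  set h := (n + 1) / 2 with hh
  have hh1 : 1 ≤ h := by omega
  have hhn : h - 1 ≤ mid.length := by omega
  set h' := (mid.length + 1) / 2 with hh'
  have hh'' : h' = h - 1 := by omega
  have hLeq : (p :: (mid ++ [q])).take h = p :: mid.take h' := by
    rw [show h = (h - 1) + 1 by omega]
    rw [List.take_succ_cons, List.take_append]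
    rw [show h - 1 - mid.length = 0 by omega]
    simp [hh'']
  have hReq : (p :: (mid ++ [q])).drop h = mid.drop h' ++ [q] := by
    rw [show h = (h - 1) + 1 by omega]
    rw [List.drop_succ_cons, List.drop_append]
    rw [show h - 1 - mid.length = 0 by omega]
    simp [hh'']
  have hsetL : (p :: (mid ++ [q])).take (((p :: (mid ++ [q])).length + 1) / 2) = p :: mid.take h' := by
    rw [hlen, ← hh]; exact hLeq
  have hsetR : (p :: (mid ++ [q])).drop (((p :: (mid ++ [q])).length + 1) / 2) = mid.drop h' ++ [q] := by
    rw [hlen, ← hh]; exact hReq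
  have hformSS : ∀ e s : Nat, pvMinEnd (p :: mid.take h') t = some e →
      pvMaxStart (mid.drop h' ++ [q]) t = some s →
      pvForm (p :: (mid ++ [q])) t = if e ≤ s then ((t.drop e).take (s - e), false) else (['*', '*'], true) :=
    fun e s hM hS => pvForm_some_some (by rw [hsetL]; exact hM) (by rw [hsetR]; exact hS)
  have hformN1 : pvMinEnd (p :: mid.take h') t = none → pvForm (p :: (mid ++ [q])) t = (['*', '*'], true) :=
    fun hM => pvForm_none_left (by rw [hsetL]; exact hM)
  have hformN2 : pvMaxStart (mid.drop h' ++ [q]) t = none → pvForm (p :: (mid ++ [q])) t = (['*', '*'], true) :=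
    fun hS => pvForm_none_right (by rw [hsetR]; exact hS)
  have hR' : ∀ r ∈ mid.drop h', r ≠ [] := fun r hr => hmid r (List.mem_of_mem_drop hr)
  by_cases hf : PySem.Chars.find t p < 0
  · rw [if_pos hf, hformN1 (pvMinEnd_cons_neg hp _ t hf)]
  · have hf' : 0 ≤ PySem.Chars.find t p := by omega
    rw [if_neg hf]
    obtain ⟨hppre, hpmin⟩ := PySem.Chars.find_spec hf'
    set j := (PySem.Chars.find t p).toNat with hj
    set a := j + p.length with ha
    set t1 := t.drop a with ht1
    have hp0 : p.length ≠ 0 := fun h0 => hp (List.eq_nil_of_length_eq_zero h0)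
    have hjlen : j < t.length := by
      by_contra hge
      rw [List.drop_eq_nil_of_le (by omega)] at hppre
      exact hp (List.prefix_nil.mp hppre)
    have halen : a ≤ t.length := by
      have := hppre.length_le
      simp at this
      omega
    have ht1len : t1.length = t.length - a := by simp [ht1]
    have hcons := pvMinEnd_cons hp (mid.take h') t hf'
    rw [← hj, ← ha, ← ht1] at hcons
    by_cases hfq : PySem.Chars.find t1 q < 0
    · rw [if_pos hfq]
      have hnoq : ¬ q <:+: t1 := (pvFind_neg_iff t1 q).mp hfq
      cases hML : pvMinEnd (mid.take h') t1 with
      | none =>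
        rw [hML, Option.map_none] at hcons
        rw [hformN1 hcons]
      | some e' =>
        rw [hML, Option.map_some] at hcons
        cases hMS : pvMaxStart (mid.drop h' ++ [q]) t with
        | none => rw [hformN2 hMS]
        | some s =>
          have hsa : s < a := by
            rw [pvMaxStart_eq_some] at hMS
            obtain ⟨jq, hqpre, -⟩ := (pvOcc_snoc_iff hR' hq (t.drop s)).mp hMS.2.1
            rw [List.drop_drop] at hqpre
            by_contra hge
            have : q <+: t1.drop (s + jq - a) := by
              rw [ht1, List.drop_drop, show a + (s + jq - a) = s + jq by omega]
              exact hqpre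
            exact hnoq (pvPrefix_drop_infix this)
          rw [hformSS _ _ hcons hMS, if_neg (by omega)]
    · rw [if_neg hfq]
      have hinf : q <:+: t1 := by
        by_contra hc
        exact hfq ((pvFind_neg_iff t1 q).mpr hc)
      obtain ⟨k, hk1, hk2, hk3, hk4⟩ := pvRfind_spec_of_infix hq hinf
      rw [hk1, Int.toNat_natCast]
      set u := t1.take k with hu
      have hulen : u.length = k := by simp [hu]; omega
      -- a start of an occurrence of q in t is either below a or at most k into t1
      have hposk : ∀ m jq, q <+: t.drop (m + jq) → m + jq < a ∨ m + jq - a ≤ k := by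
        intro m jq hqpre
        by_cases hpos : m + jq < a
        · exact Or.inl hpos
        · right
          by_contra hgt
          refine hk4 (m + jq - a) (by omega) ?_
          rw [ht1, List.drop_drop, show a + (m + jq - a) = m + jq by omega]
          exact hqpre
      have hmidlen : (mid.length + 1) / 2 = h' := rfl
      cases hMU : pvMinEnd (mid.take h') u with
      | none =>
        rw [pvForm_none_left (ls := mid) (t := u) hMU]
        cases hML : pvMinEnd (mid.take h') t1 with
        | none =>
          rw [hML, Option.map_none] at hcons
          rw [hformN1 hcons]
        | some e'' =>
          have hek : k < e'' := by
            by_contra hle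
            rw [pvMinEnd_take_of_le hML (by omega)] at hMU
            cases hMU
          rw [hML, Option.map_some] at hcons
          cases hMS : pvMaxStart (mid.drop h' ++ [q]) t with
          | none => rw [hformN2 hMS]
          | some s =>
            have hsak : s ≤ a + k := by
              rw [pvMaxStart_eq_some] at hMS
              obtain ⟨jq, hqpre, -⟩ := (pvOcc_snoc_iff hR' hq (t.drop s)).mp hMS.2.1
              rw [List.drop_drop] at hqpre
              rcases hposk s jq hqpre with hlt | hle <;> omega
            rw [hformSS _ _ hcons hMS, if_neg (by omega)]
      | some e' =>
        have hML : pvMinEnd (mid.take h') t1 = some e' := pvMinEnd_of_take (hu ▸ hMU)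
        have he'u : e' ≤ k := by
          rw [pvMinEnd_eq_some] at hMU
          have := hMU.1
          omega
        rw [hML, Option.map_some] at hcons
        cases hSU : pvMaxStart (mid.drop h') u with
        | none =>
          rw [pvForm_none_right (ls := mid) (t := u) hSU]
          have hnoRu : pvOcc (mid.drop h') u = false := pvMaxStart_eq_none.mp hSU
          cases hMS : pvMaxStart (mid.drop h' ++ [q]) t with
          | none => rw [hformN2 hMS]
          | some s =>
            have hsa : s < a := by
              rw [pvMaxStart_eq_some] at hMS
              obtain ⟨jq, hqpre, hRocc⟩ := (pvOcc_snoc_iff hR' hq (t.drop s)).mp hMS.2.1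
              rw [List.drop_drop] at hqpre
              by_contra hge
              have hge' : a ≤ s := by omega
              rcases hposk s jq hqpre with hlt | hle
              · omega
              · have hjqle : jq ≤ k - (s - a) := by omega
                have hdrop : (t.drop s).take jq = (t1.drop (s - a)).take jq := by
                  rw [ht1, List.drop_drop, show a + (s - a) = s by omega]
                have hocc2 : pvOcc (mid.drop h') ((t1.drop (s - a)).take (k - (s - a))) = true := by
                  refine pvOcc_take_mono hjqle ?_
                  rw [← hdrop]
                  exact hRocc
                have hueq : u.drop (s - a) = (t1.drop (s - a)).take (k - (s - a)) := by
                  rw [hu, List.drop_take]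
                have : pvOcc (mid.drop h') u = true := pvOcc_of_drop (by rw [hueq]; exact hocc2)
                rw [hnoRu] at this
                cases this
            rw [hformSS _ _ hcons hMS, if_neg (by omega)]
        | some s' =>
          rw [pvMaxStart_eq_some] at hSU
          obtain ⟨hs1, hs2, hs3⟩ := hSU
          have hs1' : s' ≤ k := by omega
          have hMS : pvMaxStart (mid.drop h' ++ [q]) t = some (a + s') := by
            rw [pvMaxStart_eq_some]
            refine ⟨by omega, ?_, ?_⟩
            · refine (pvOcc_snoc_iff hR' hq (t.drop (a + s'))).mpr ⟨k - s', ?_, ?_⟩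
              · rw [List.drop_drop, show a + s' + (k - s') = a + k by omega]
                rw [show t.drop (a + k) = t1.drop k by rw [ht1, List.drop_drop]]
                exact hk3
              · rw [show (t.drop (a + s')).take (k - s') = u.drop s' by
                  rw [hu, List.drop_take, ht1, List.drop_drop]]
                exact hs2
            · intro m hm1 hm2
              by_contra hcon
              have hcon' : pvOcc (mid.drop h' ++ [q]) (t.drop m) = true := by simpa using hcon
              obtain ⟨jq, hqpre, hRocc⟩ := (pvOcc_snoc_iff hR' hq (t.drop m)).mp hcon'
              rw [List.drop_drop] at hqpre
              rcases hposk m jq hqpre with hlt | hle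
              · omega
              · have hma : a ≤ m := by omega
                have hjqle : jq ≤ k - (m - a) := by omega
                have hdrop : (t.drop m).take jq = (t1.drop (m - a)).take jq := by
                  rw [ht1, List.drop_drop, show a + (m - a) = m by omega]
                have hocc2 : pvOcc (mid.drop h') ((t1.drop (m - a)).take (k - (m - a))) = true := by
                  refine pvOcc_take_mono hjqle ?_
                  rw [← hdrop]
                  exact hRocc
                have hueq : u.drop (m - a) = (t1.drop (m - a)).take (k - (m - a)) := by
                  rw [hu, List.drop_take]
                have hx := hs3 (m - a) (by omega) (by omega)
                rw [← hueq] at hocc2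
                rw [hx] at hocc2
                cases hocc2
          rw [hformSS _ _ hcons hMS]
          rw [pvForm_some_some (ls := mid) (t := u) hMU
            (by rw [pvMaxStart_eq_some]; exact ⟨hs1, hs2, hs3⟩)]
          by_cases hes : e' ≤ s'
          · rw [if_pos (by omega), if_pos hes]
            have hseg : (t.drop (a + e')).take (a + s' - (a + e')) = (u.drop e').take (s' - e') := by
              rw [hu, List.drop_take, List.take_take]
              rw [show a + s' - (a + e') = s' - e' by omega]
              rw [min_eq_left (by omega)]
              rw [ht1, List.drop_drop]
            rw [hseg]
          · rw [if_neg (by omega), if_neg hes]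

-- ---- range and loop-state plumbing ----
theorem pvRange_nil (a : Int) : PySem.List.pyRange a a = [] := by
  rw [List.eq_nil_iff_forall_not_mem]
  intro x hx
  rw [PySem.List.mem_pyRange_one] at hx
  omega

theorem pvRange_shift : ∀ m : Nat, PySem.List.pyRange 1 (((m + 1 : Nat) : Int)) =
    (PySem.List.pyRange 0 ((m : Nat) : Int)).map (· + 1) := by
  intro m
  induction m with
  | zero =>
    rw [show ((0 : Nat) : Int) = 0 by rfl, pvRange_nil]
    rw [show ((0 + 1 : Nat) : Int) = 1 by rfl, pvRange_nil]
    rfl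
  | succ m ih =>
    have h1 : ((m + 1 + 1 : Nat) : Int) = ((m + 1 : Nat) : Int) + 1 := by push_cast; ring
    have h2 : ((m + 1 : Nat) : Int) = ((m : Nat) : Int) + 1 := by push_cast; ring
    rw [h1, PySem.List.pyRange_one_succ_right (by omega), ih]
    rw [h2, PySem.List.pyRange_one_succ_right (by omega)]
    rw [List.map_append]
    rfl

theorem pvBody_broken (ls : List (List Char)) (l : List Int) :
    l.foldl (pvBody ls) (['*', '*'], true) = (['*', '*'], true) := by
  induction l with
  | nil => rfl
  | cons x l ih =>
    rw [List.foldl_cons, show pvBody ls (['*', '*'], true) x = (['*', '*'], true) from rfl]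
    exact ih

theorem pvGetElem_cons_shift (p : List Char) (xs : List (List Char)) (i : Nat) (h1 : 1 ≤ i)
    (hi : i < (p :: xs).length) : (p :: xs)[i] = xs[i - 1]'(by simp at hi; omega) := by
  rcases Nat.exists_eq_add_of_le h1 with ⟨d, rfl⟩
  simp [Nat.add_comm 1 d]

-- index shift: iteration i+1 of the loop on p :: mid ++ [q] is iteration i on mid
theorem pvBody_shift (p q : List Char) (mid : List (List Char)) (j : Int)
    (hj : 0 ≤ j) (hjlt : j < (((mid.length + 2 + 1) / 2 : Nat) : Int) - 1) (st : List Char × Bool) :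
    pvBody (p :: (mid ++ [q])) st (j + 1) = pvBody mid st j := by
  set n := mid.length + 2 with hn
  set h := (n + 1) / 2 with hh
  have hlen : (p :: (mid ++ [q])).length = n := by simp [hn]
  have hjh : j + 1 < (h : Int) := by omega
  have hh2 : 2 ≤ h := by omega
  have hn3 : 3 ≤ n := by omega
  have hhn : h ≤ n - 1 := by omega
  have hjn : (j + 1).toNat < n := by omega
  have hli : PySem.List.pyGetD (p :: (mid ++ [q])) (j + 1) [] = PySem.List.pyGetD mid j [] := by
    rw [PySem.List.pyGetD_eq_getElem _ _ (by omega) (by rw [hlen]; exact_mod_cast (by omega : (j + 1 : Int) < (n : Int)))]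
    rw [PySem.List.pyGetD_eq_getElem _ _ hj (by exact_mod_cast (by omega : (j : Int) < (mid.length : Int)))]
    have hjt : (j + 1).toNat = j.toNat + 1 := by omega
    simp only [hjt, List.getElem_cons_succ]
    rw [List.getElem_append_left (by omega)]
  have hri : PySem.List.pyGetD (p :: (mid ++ [q])) (-(j + 1 + 1)) [] =
      PySem.List.pyGetD mid (-(j + 1)) [] := by
    have hcast1 : (-(j + 1 + 1) : Int) = -((j.toNat + 2 : Nat) : Int) := by push_cast; omega
    have hcast2 : (-(j + 1) : Int) = -((j.toNat + 1 : Nat) : Int) := by push_cast; omega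
    rw [hcast1, hcast2]
    rw [PySem.List.pyGetD_neg_natCast _ _ _ (by omega) (by rw [hlen]; omega)]
    rw [PySem.List.pyGetD_neg_natCast _ _ _ (by omega) (by omega)]
    simp only [hlen]
    rw [pvGetElem_cons_shift _ _ _ (by omega) (by simp; omega)]
    rw [List.getElem_append_left (by omega)]
    simp only [show n - (j.toNat + 2) - 1 = mid.length - (j.toNat + 1) from by omega]
  have hflag : ((j + 1 != ((((p :: (mid ++ [q])).length + 1) / 2 : Nat) : Int) - 1) ||
        ((p :: (mid ++ [q])).length % 2 == 0)) =
      ((j != ((((mid.length + 1) / 2 : Nat)) : Int) - 1) || (mid.length % 2 == 0)) := by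
    simp only [hlen]
    rw [Bool.eq_iff_iff]
    simp only [Bool.or_eq_true, bne_iff_ne, beq_iff_eq]
    constructor
    · rintro (h1 | h1)
      · left; intro hc; apply h1; omega
      · right; omega
    · rintro (h1 | h1)
      · left; intro hc; apply h1; omega
      · right; omega
  simp only [pvBody]
  rw [hli, hri, hflag]

-- first iteration of the loop on p :: mid ++ [q]
theorem pvBody_zero (p q : List Char) (mid : List (List Char)) (t : List Char) :
    pvBody (p :: (mid ++ [q])) (t, false) 0 =
      if PySem.Chars.find t p == -1 then (['*', '*'], true)
      else if PySem.Chars.find (t.drop ((PySem.Chars.find t p).toNat + p.length)) q == -1 then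
        (['*', '*'], true)
      else ((t.drop ((PySem.Chars.find t p).toNat + p.length)).take
        (PySem.Chars.rfind (t.drop ((PySem.Chars.find t p).toNat + p.length)) q).toNat, false) := by
  set n := mid.length + 2 with hn
  have hlen : (p :: (mid ++ [q])).length = n := by simp [hn]
  have hli : PySem.List.pyGetD (p :: (mid ++ [q])) 0 [] = p := PySem.List.pyGetD_zero_cons ..
  have hri : PySem.List.pyGetD (p :: (mid ++ [q])) (-(0 + 1)) [] = q := by
    rw [show ((p : List Char) :: (mid ++ [q])) = (p :: mid) ++ [q] by simp]
    rw [show (-(0 + 1) : Int) = -1 by ring]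
    exact PySem.List.pyGetD_neg_one_append_singleton ..
  have hflag : (((0 : Int) != ((((p :: (mid ++ [q])).length + 1) / 2 : Nat) : Int) - 1) ||
        ((p :: (mid ++ [q])).length % 2 == 0)) = true := by
    simp only [hlen]
    rw [Bool.eq_iff_iff]
    simp only [Bool.or_eq_true, bne_iff_ne, beq_iff_eq]
    constructor
    · intro; trivial
    · intro
      by_cases hone : (n + 1) / 2 = 1
      · right; omega
      · left; intro hc; omega
  simp only [pvBody]
  rw [hli, hri, hflag]
  simp only [Bool.false_eq_true, if_false, if_true]

-- the loop equals its closed form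
theorem pvLoopA_eq_form_nil (t : List Char) : pvLoopA [] t = pvForm [] t := by
  rw [pvLoopA, pvForm_some_some (ls := []) (t := t) (e := 0) (s := t.length)]
  · rw [show ((((List.length ([] : List (List Char)))) + 1) / 2 : Nat) = 0 from rfl]
    rw [show ((0 : Nat) : Int) = 0 from rfl, pvRange_nil]
    rw [if_pos (by omega)]
    simp
  · rw [pvMinEnd_eq_some]
    exact ⟨by omega, rfl, fun m hm => by omega⟩
  · rw [pvMaxStart_eq_some]
    exact ⟨le_refl _, rfl, fun m hm1 hm2 => by omega⟩

theorem pvLoopA_eq_form_one {p : List Char} (hp : p ≠ []) (t : List Char) :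
    pvLoopA [p] t = pvForm [p] t := by
  rw [pvLoopA]
  rw [show (((([p] : List (List Char)).length + 1) / 2 : Nat) : Int) = 1 from by simp]
  rw [PySem.List.pyRange_one_cons (by omega), show (0 : Int) + 1 = 1 by ring, pvRange_nil]
  rw [List.foldl_cons, List.foldl_nil]
  by_cases hf : PySem.Chars.find t p < 0
  · have hfe : (PySem.Chars.find t p == -1) = true := by
      have := PySem.Chars.neg_one_le_find t p
      simp only [beq_iff_eq]
      omega
    rw [show pvBody [p] (t, false) 0 = (['*', '*'], true) from by
      simp only [pvBody]
      rw [PySem.List.pyGetD_zero_cons, hfe]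
      rw [if_neg (by simp), if_pos rfl]]
    rw [pvForm_none_left (ls := [p]) (t := t) (by
      rw [show ([p] : List (List Char)).take ((([p] : List (List Char)).length + 1) / 2) = [p] from
        List.take_of_length_le (by simp)]
      exact pvMinEnd_cons_neg hp [] t hf)]
  · have hf' : 0 ≤ PySem.Chars.find t p := by omega
    have hfe : (PySem.Chars.find t p == -1) = false := by
      rw [beq_eq_false_iff_ne]
      omega
    obtain ⟨hppre, -⟩ := PySem.Chars.find_spec hf'
    have hp0 : p.length ≠ 0 := fun h0 => hp (List.eq_nil_of_length_eq_zero h0)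
    have hjlen : (PySem.Chars.find t p).toNat < t.length := by
      by_contra hge
      rw [List.drop_eq_nil_of_le (by omega)] at hppre
      exact hp (List.prefix_nil.mp hppre)
    have halen : (PySem.Chars.find t p).toNat + p.length ≤ t.length := by
      have := hppre.length_le
      simp at this
      omega
    have hflag : (((0 : Int) != (((([p] : List (List Char)).length + 1) / 2 : Nat) : Int) - 1) ||
        (([p] : List (List Char)).length % 2 == 0)) = false := by simp
    rw [show pvBody [p] (t, false) 0 =
        (t.drop ((PySem.Chars.find t p).toNat + p.length), false) from by
      simp only [pvBody]
      rw [PySem.List.pyGetD_zero_cons, hfe, hflag]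
      simp]
    have hM : pvMinEnd (([p] : List (List Char)).take ((([p] : List (List Char)).length + 1) / 2)) t =
        some ((PySem.Chars.find t p).toNat + p.length) := by
      rw [show ([p] : List (List Char)).take ((([p] : List (List Char)).length + 1) / 2) = [p] from
        List.take_of_length_le (by simp)]
      rw [pvMinEnd_cons hp [] t hf']
      rw [show pvMinEnd [] (t.drop ((PySem.Chars.find t p).toNat + p.length)) = some 0 from by
        rw [pvMinEnd_eq_some]
        exact ⟨by omega, rfl, fun m hm => by omega⟩]
      simp
    have hS : pvMaxStart (([p] : List (List Char)).drop ((([p] : List (List Char)).length + 1) / 2)) t =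
        some t.length := by
      rw [show ([p] : List (List Char)).drop ((([p] : List (List Char)).length + 1) / 2) = [] from by simp]
      rw [pvMaxStart_eq_some]
      exact ⟨le_refl _, rfl, fun m hm1 hm2 => by omega⟩
    rw [pvForm_some_some hM hS, if_pos (by omega)]
    rw [List.take_of_length_le (by simp)]

theorem pvLoopA_eq_form : ∀ (N : Nat) (ls : List (List Char)), ls.length ≤ N →
    (∀ p ∈ ls, p ≠ []) → ∀ t, pvLoopA ls t = pvForm ls t := by
  intro N
  induction N with
  | zero =>
    intro ls hlen hps t
    have : ls = [] := List.eq_nil_of_length_eq_zero (by omega)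
    subst this
    exact pvLoopA_eq_form_nil t
  | succ N ih =>
    intro ls hlen hps t
    match ls with
    | [] => exact pvLoopA_eq_form_nil t
    | [p] => exact pvLoopA_eq_form_one (hps p (by simp)) t
    | p :: r :: rest =>
      have hp : p ≠ [] := hps p (by simp)
      obtain ⟨mid, q, hmq⟩ : ∃ mid q, (r :: rest : List (List Char)) = mid ++ [q] :=
        ⟨(r :: rest).dropLast, (r :: rest).getLast (by simp), (List.dropLast_append_getLast (by simp)).symm⟩
      rw [show (p :: r :: rest : List (List Char)) = p :: (mid ++ [q]) by rw [← hmq]]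
      have hq : q ≠ [] := by
        refine hps q ?_
        rw [show (p :: r :: rest : List (List Char)) = p :: (mid ++ [q]) by rw [← hmq]]
        simp
      have hmid : ∀ x ∈ mid, x ≠ [] := by
        intro x hx
        refine hps x ?_
        rw [show (p :: r :: rest : List (List Char)) = p :: (mid ++ [q]) by rw [← hmq]]
        simp [hx]
      have hmidlen : mid.length + 2 ≤ N + 1 := by
        have hlen2 := congrArg List.length hmq
        simp at hlen2
        simp at hlen
        omega
      set n := mid.length + 2 with hn
      set h := (n + 1) / 2 with hh
      have hlslen : (p :: (mid ++ [q])).length = n := by simp [hn]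
      have hh1 : 1 ≤ h := by omega
      rw [pvLoopA, hlslen, ← hh]
      rw [PySem.List.pyRange_one_cons (by exact_mod_cast (by omega : (0 : Int) < (h : Int)))]
      rw [List.foldl_cons]
      rw [show (0 : Int) + 1 = 1 by ring]
      rw [pvForm_step p q mid hp hq hmid t]
      rw [pvBody_zero p q mid t]
      by_cases hf : PySem.Chars.find t p < 0
      · have hfe : (PySem.Chars.find t p == -1) = true := by
          have := PySem.Chars.neg_one_le_find t p
          simp only [beq_iff_eq]
          omega
        rw [hfe, if_pos hf, if_pos rfl]
        exact pvBody_broken _ _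
      · have hfe : (PySem.Chars.find t p == -1) = false := by
          rw [beq_eq_false_iff_ne]
          omega
        rw [hfe, if_neg hf, if_neg (by simp)]
        by_cases hfq : PySem.Chars.find (t.drop ((PySem.Chars.find t p).toNat + p.length)) q < 0
        · have hfqe : (PySem.Chars.find (t.drop ((PySem.Chars.find t p).toNat + p.length)) q == -1) = true := by
            have := PySem.Chars.neg_one_le_find (t.drop ((PySem.Chars.find t p).toNat + p.length)) q
            simp only [beq_iff_eq]
            omega
          rw [hfqe, if_pos hfq, if_pos rfl]
          exact pvBody_broken _ _
        · have hfqe : (PySem.Chars.find (t.drop ((PySem.Chars.find t p).toNat + p.length)) q == -1) = false := by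
            rw [beq_eq_false_iff_ne]
            omega
          rw [hfqe, if_neg hfq, if_neg (by simp)]
          rw [show ((h : Nat) : Int) = (((h - 1) + 1 : Nat) : Int) by congr 1; omega]
          rw [pvRange_shift (h - 1)]
          rw [List.foldl_map]
          rw [PySem.List.foldl_congr_mem _ _
            (fun acc x => pvBody mid acc x) _
            (fun acc x hx => by
              rw [PySem.List.mem_pyRange_one] at hx
              exact pvBody_shift p q mid x hx.1 (by
                have hx2 := hx.2
                omega) acc)]
          rw [show (PySem.List.pyRange 0 (((h - 1 : Nat)) : Int)).foldl
              (fun acc x => pvBody mid acc x) (_, false) = pvLoopA mid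
                ((t.drop ((PySem.Chars.find t p).toNat + p.length)).take
                  (PySem.Chars.rfind (t.drop ((PySem.Chars.find t p).toNat + p.length)) q).toNat) from by
            rw [pvLoopA]
            rw [show ((mid.length + 1) / 2 : Nat) = h - 1 by omega]]
          exact ih mid (by omega) hmid _

-- ---- assembling the ports ----
def pvLow (key : List String) : List (List Char) :=
  (aLetters key).map fun k => PySem.Chars.lower k.toList

def pvCondA (key : List String) (w : String) : Bool :=
  (pvLoopA (pvLow key) (aTrim key w)).1 != ['*', '*']

def pvCondB (key : List String) (w : String) : Bool :=
  pvConsume (pvLow key) (aTrim key w)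

theorem pvLetters_eq (key : List String) :
    aLetters key = key.filter (fun k => !(PySem.Str.isIn "?" k) && !(PySem.Str.isIn "*" k)) := by
  rw [aLetters]
  rw [show (fun (acc : List String) (i : String) =>
      if PySem.Str.find i "?" == -1 && PySem.Str.find i "*" == -1 then acc ++ [i] else acc) =
    (fun (acc : List String) (i : String) =>
      if (!(PySem.Str.isIn "?" i) && !(PySem.Str.isIn "*" i)) = true then acc ++ [id i] else acc) from by
    funext acc i
    congr 2
    simp [PySem.Str.isIn, PySem.Str.find, PySem.Chars.isIn, bne, Bool.not_not]]
  rw [PySem.List.foldl_append_if]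
  simp

theorem pvStr_bne_isIn (s sub : String) : (PySem.Str.find s sub != -1) = PySem.Str.isIn sub s := by
  simp [PySem.Str.isIn, PySem.Str.find, PySem.Chars.isIn]

theorem pvStr_beq_isIn (s sub : String) : (PySem.Str.find s sub == -1) = !(PySem.Str.isIn sub s) := by
  simp [PySem.Str.isIn, PySem.Str.find, PySem.Chars.isIn, bne, Bool.not_not]

theorem pvBridge (key : List String) (w2 : List Char) :
    (PySem.List.pyRange 0 ((((aLetters key).length + 1) / 2 : Nat) : Int) 1).foldl
      (fun (st : List Char × Bool) i =>
        if st.2 then st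
        else
          let li := PySem.Chars.lower ((PySem.List.pyGetD (aLetters key) i "").toList)
          if PySem.Chars.find st.1 li == -1 then (['*', '*'], true)
          else
            let w := st.1.drop ((PySem.Chars.find st.1 li).toNat + li.length)
            if i != ((((aLetters key).length + 1) / 2 : Nat) : Int) - 1 || (aLetters key).length % 2 == 0 then
              let ri := PySem.Chars.lower ((PySem.List.pyGetD (aLetters key) (-(i + 1)) "").toList)
              if PySem.Chars.find w ri == -1 then (['*', '*'], true)
              else (w.take (PySem.Chars.rfind w ri).toNat, false)
            else (w, false))
      (w2, false) = pvLoopA (pvLow key) w2 := by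
  have hget : ∀ i : Int, PySem.List.pyGetD (pvLow key) i [] =
      PySem.Chars.lower ((PySem.List.pyGetD (aLetters key) i "").toList) := by
    intro i
    rw [show ([] : List Char) = (fun k : String => PySem.Chars.lower k.toList) "" from rfl]
    exact PySem.List.pyGetD_map _ _ _ _
  have hlen : (pvLow key).length = (aLetters key).length := by
    rw [pvLow, List.length_map]
  rw [pvLoopA, hlen]
  refine PySem.List.foldl_congr_mem _ _ _ _ (fun st i _ => ?_)
  simp only [pvBody, hlen, hget]

theorem pvA_main (word_list : List String) (key : List String) (result : List String)
    (hlen : ((aLetters key).length == 0) = false) :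
    letters_search word_list key result = result ++ word_list.filter (pvCondA key) := by
  rw [letters_search]
  rw [if_neg (by rw [hlen]; simp)]
  rw [show (fun (res : List String) (word : String) =>
      let w2 := aTrim key word
      let st := (PySem.List.pyRange 0 ((((aLetters key).length + 1) / 2 : Nat) : Int) 1).foldl
        (fun (st : List Char × Bool) i =>
          if st.2 then st
          else
            let li := PySem.Chars.lower ((PySem.List.pyGetD (aLetters key) i "").toList)
            if PySem.Chars.find st.1 li == -1 then (['*', '*'], true)
            else
              let w := st.1.drop ((PySem.Chars.find st.1 li).toNat + li.length)
              if i != ((((aLetters key).length + 1) / 2 : Nat) : Int) - 1 || (aLetters key).length % 2 == 0 then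
                let ri := PySem.Chars.lower ((PySem.List.pyGetD (aLetters key) (-(i + 1)) "").toList)
                if PySem.Chars.find w ri == -1 then (['*', '*'], true)
                else (w.take (PySem.Chars.rfind w ri).toNat, false)
              else (w, false))
        (w2, false)
      if st.1 != ['*', '*'] then res ++ [word] else res) =
    (fun (res : List String) (word : String) =>
      if pvCondA key word = true then res ++ [id word] else res) from by
    funext res word
    rw [show pvCondA key word = ((pvLoopA (pvLow key) (aTrim key word)).1 != ['*', '*']) from rfl]
    rw [← pvBridge key (aTrim key word)]
    rfl]
  rw [PySem.List.foldl_append_if]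
  simp

theorem pvB_main (word_list : List String) (key : List String) (result : List String)
    (hlen : ((aLetters key).length == 0) = false) :
    letters_search_alt word_list key result = result ++ word_list.filter (pvCondB key) := by
  rw [letters_search_alt]
  rw [show key.filter (fun k => !(PySem.Str.isIn "?" k) && !(PySem.Str.isIn "*" k)) = aLetters key from
    (pvLetters_eq key).symm]
  rw [if_neg (by rw [hlen]; simp)]
  show List.foldl (fun res word => if pvCondB key word = true then res ++ [word] else res)
    result word_list = result ++ word_list.filter (pvCondB key)
  rw [show (fun (res : List String) (word : String) => if pvCondB key word = true then res ++ [word] else res) =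
    (fun (res : List String) (word : String) => if pvCondB key word = true then res ++ [id word] else res) from rfl]
  rw [PySem.List.foldl_append_if]
  simp

-- nonempty letters under Pre_
theorem pvLow_nonempty {key : List String} (hne : "" ∉ key) : ∀ x ∈ pvLow key, x ≠ [] := by
  intro x hx
  rw [pvLow, List.mem_map] at hx
  obtain ⟨k, hk, rfl⟩ := hx
  rw [pvLetters_eq] at hk
  have hkk : k ∈ key := List.mem_of_mem_filter hk
  have hkne : k ≠ "" := fun h => hne (h ▸ hkk)
  intro hnil
  rw [PySem.Chars.lower] at hnil
  rw [List.map_eq_nil_iff] at hnil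
  exact hkne (by apply String.ext; simpa using hnil)

-- the per-word comparison
theorem pvCollides_char (key : List String) (w : String) :
    pvCollides key w =
      match pvG ((pvLow key).take (((pvLow key).length + 1) / 2)) (aTrim key w),
        pvG (((pvLow key).drop (((pvLow key).length + 1) / 2)).reverse.map List.reverse)
          (aTrim key w).reverse with
      | some e, some m =>
        ((aTrim key w).drop e).take ((aTrim key w).length - m - e) == ['*', '*']
      | _, _ => false := rfl

theorem pvWordFacts (key : List String) (w : String) (hne : "" ∉ key) :
    (pvCondA key w = ((pvForm (pvLow key) (aTrim key w)).1 != ['*', '*'])) ∧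
    (pvCondB key w = pvOcc (pvLow key) (aTrim key w)) := by
  have hnil := pvLow_nonempty hne
  constructor
  · rw [pvCondA, pvLoopA_eq_form (pvLow key).length (pvLow key) (le_refl _) hnil]
  · rw [pvCondB]
    exact pvConsume_eq_occ hnil _

theorem pvWord (key : List String) (w : String) (hne : "" ∉ key)
    (hcol : pvCollides key w = false) : pvCondA key w = pvCondB key w := by
  have hnil := pvLow_nonempty hne
  set ls := pvLow key with hls
  set t := aTrim key w with ht
  set h := (ls.length + 1) / 2 with hh
  have hnilT : ∀ x ∈ ls.take h, x ≠ [] := fun x hx => hnil x (List.mem_of_mem_take hx)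
  have hnilD : ∀ x ∈ ls.drop h, x ≠ [] := fun x hx => hnil x (List.mem_of_mem_drop hx)
  have hnilR : ∀ x ∈ (ls.drop h).reverse.map List.reverse, x ≠ [] := by
    intro x hx
    rw [List.mem_map] at hx
    obtain ⟨y, hy, rfl⟩ := hx
    have := hnilD y (List.mem_reverse.mp hy)
    simpa using this
  have h1 : pvG (ls.take h) t = pvMinEnd (ls.take h) t := pvG_eq_minEnd hnilT t
  have h2 : pvG ((ls.drop h).reverse.map List.reverse) t.reverse =
      pvMinEnd ((ls.drop h).reverse.map List.reverse) t.reverse := pvG_eq_minEnd hnilR t.reverse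
  have h3 := pvMaxStart_eq_reverse hnilD t
  obtain ⟨hA, hB⟩ := pvWordFacts key w hne
  have hocc_iff : pvOcc ls t = true ↔
      ∃ e s, pvMinEnd (ls.take h) t = some e ∧ pvMaxStart (ls.drop h) t = some s ∧ e ≤ s := by
    have := pvOcc_iff_minmax hnilT (ls.drop h) t
    rwa [List.take_append_drop] at this
  rw [pvCollides_char, h1, h2] at hcol
  rw [hA, hB]
  cases hE : pvMinEnd (ls.take h) t with
  | none =>
    rw [pvForm_none_left (ls := ls) (t := t) hE]
    have hocc : pvOcc ls t = false := by
      by_contra hcon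
      obtain ⟨e, s, hEe, -, -⟩ := hocc_iff.mp (by simpa using hcon)
      rw [hE] at hEe
      cases hEe
    rw [hocc]
    decide
  | some e =>
    cases hMrev : pvMinEnd ((ls.drop h).reverse.map List.reverse) t.reverse with
    | none =>
      have hS : pvMaxStart (ls.drop h) t = none := by rw [h3, hMrev]; rfl
      rw [pvForm_none_right (ls := ls) (t := t) hS]
      have hocc : pvOcc ls t = false := by
        by_contra hcon
        obtain ⟨e', s', -, hS', -⟩ := hocc_iff.mp (by simpa using hcon)
        rw [hS] at hS'
        cases hS'
      rw [hocc]
      decide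
    | some m =>
      have hS : pvMaxStart (ls.drop h) t = some (t.length - m) := by rw [h3, hMrev]; rfl
      rw [hE, hMrev] at hcol
      have hseg : ((t.drop e).take (t.length - m - e) == ['*', '*']) = false := hcol
      rw [pvForm_some_some (ls := ls) (t := t) hE hS]
      by_cases hes : e ≤ t.length - m
      · rw [if_pos hes]
        have hocc : pvOcc ls t = true := hocc_iff.mpr ⟨e, t.length - m, hE, hS, hes⟩
        rw [hocc]
        rw [show ((t.drop e).take (t.length - m - e) != ['*', '*']) =
          !((t.drop e).take (t.length - m - e) == ['*', '*']) from rfl]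
        rw [hseg]
        rfl
      · rw [if_neg hes]
        have hocc : pvOcc ls t = false := by
          by_contra hcon
          obtain ⟨e', s', hE', hS', hle⟩ := hocc_iff.mp (by simpa using hcon)
          rw [hE] at hE'
          rw [hS] at hS'
          cases hE'
          cases hS'
          exact hes hle
        rw [hocc]
        decide

theorem pvWordDiff (key : List String) (w : String) (hne : "" ∉ key)
    (hcol : pvCollides key w = true) : pvCondA key w = false ∧ pvCondB key w = true := by
  have hnil := pvLow_nonempty hne
  set ls := pvLow key with hls
  set t := aTrim key w with ht
  set h := (ls.length + 1) / 2 with hh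
  have hnilT : ∀ x ∈ ls.take h, x ≠ [] := fun x hx => hnil x (List.mem_of_mem_take hx)
  have hnilD : ∀ x ∈ ls.drop h, x ≠ [] := fun x hx => hnil x (List.mem_of_mem_drop hx)
  have hnilR : ∀ x ∈ (ls.drop h).reverse.map List.reverse, x ≠ [] := by
    intro x hx
    rw [List.mem_map] at hx
    obtain ⟨y, hy, rfl⟩ := hx
    have := hnilD y (List.mem_reverse.mp hy)
    simpa using this
  have h1 : pvG (ls.take h) t = pvMinEnd (ls.take h) t := pvG_eq_minEnd hnilT t
  have h2 : pvG ((ls.drop h).reverse.map List.reverse) t.reverse =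
      pvMinEnd ((ls.drop h).reverse.map List.reverse) t.reverse := pvG_eq_minEnd hnilR t.reverse
  have h3 := pvMaxStart_eq_reverse hnilD t
  obtain ⟨hA, hB⟩ := pvWordFacts key w hne
  have hocc_iff : pvOcc ls t = true ↔
      ∃ e s, pvMinEnd (ls.take h) t = some e ∧ pvMaxStart (ls.drop h) t = some s ∧ e ≤ s := by
    have := pvOcc_iff_minmax hnilT (ls.drop h) t
    rwa [List.take_append_drop] at this
  rw [pvCollides_char, h1, h2] at hcol
  cases hE : pvMinEnd (ls.take h) t with
  | none =>
    rw [hE] at hcol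
    cases hMrev : pvMinEnd ((ls.drop h).reverse.map List.reverse) t.reverse with
    | none => rw [hMrev] at hcol; cases hcol
    | some m => rw [hMrev] at hcol; cases hcol
  | some e =>
    cases hMrev : pvMinEnd ((ls.drop h).reverse.map List.reverse) t.reverse with
    | none => rw [hE, hMrev] at hcol; cases hcol
    | some m =>
      have hm : m ≤ t.length := by
        rw [pvMinEnd_eq_some] at hMrev
        have := hMrev.1
        simpa using this
      have hS : pvMaxStart (ls.drop h) t = some (t.length - m) := by rw [h3, hMrev]; rfl
      rw [hE, hMrev] at hcol
      have hseg : (t.drop e).take (t.length - m - e) = ['*', '*'] := by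
        have : ((t.drop e).take (t.length - m - e) == ['*', '*']) = true := hcol
        exact beq_iff_eq.mp this
      have hlen2 : ((t.drop e).take (t.length - m - e)).length = 2 := by rw [hseg]; rfl
      rw [List.length_take, List.length_drop] at hlen2
      have hes : e ≤ t.length - m := by omega
      constructor
      · rw [hA, pvForm_some_some (ls := ls) (t := t) hE hS, if_pos hes]
        rw [show ((t.drop e).take (t.length - m - e) != ['*', '*']) =
          !((t.drop e).take (t.length - m - e) == ['*', '*']) from rfl]
        rw [show ((t.drop e).take (t.length - m - e) == ['*', '*']) = true from hcol]
        rfl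
      · rw [hB]
        exact hocc_iff.mpr ⟨e, t.length - m, hE, hS, hes⟩

theorem pvCountP_lt {α : Type} (p q : α → Bool) (l : List α)
    (hpq : ∀ x ∈ l, p x = true → q x = true) {w : α} (hw : w ∈ l)
    (hpw : p w = false) (hqw : q w = true) : l.countP p < l.countP q := by
  induction l with
  | nil => cases hw
  | cons x l ih =>
    have hpq' : ∀ y ∈ l, p y = true → q y = true := fun y hy => hpq y (by simp [hy])
    have hmono := List.countP_mono_left hpq'
    rcases List.mem_cons.mp hw with rfl | hwl
    · rw [List.countP_cons_of_neg (by simp [hpw]), List.countP_cons_of_pos hqw]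
      omega
    · have hx := ih hpq' hwl
      by_cases hpx : p x = true
      · rw [List.countP_cons_of_pos hpx, List.countP_cons_of_pos (hpq x (by simp) hpx)]
        omega
      · rw [List.countP_cons_of_neg hpx]
        by_cases hqx : q x = true
        · rw [List.countP_cons_of_pos hqx]
          omega
        · rw [List.countP_cons_of_neg hqx]
          omega

theorem letters_search_claims :
    Claim_unchanged_letters_search ∧ Claim_exact_letters_search := by
  constructor
  · intro word_list key result hdom hpre hnd
    obtain ⟨hk, hne⟩ := hpre
    by_cases hlen : ((aLetters key).length == 0) = true
    · simp only [letters_search, letters_search_alt]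
      rw [← pvLetters_eq key]
      rw [if_pos hlen, if_pos hlen]
      rw [pvStr_bne_isIn (PySem.List.pyGetD key 0 "") "*",
        pvStr_beq_isIn (PySem.List.pyGetD key 0 "") "?"]
    · have hlen' : ((aLetters key).length == 0) = false := by
        simpa using hlen
      rw [pvA_main word_list key result hlen', pvB_main word_list key result hlen']
      congr 1
      apply List.filter_congr
      intro x hx
      apply pvWord key x hne
      have hne2 : aLetters key ≠ [] := by
        intro hc
        rw [hc] at hlen'
        simpa using hlen'
      by_contra hcx
      have hcx' : pvCollides key x = true := by simpa using hcx
      exact hnd ⟨hne2, List.any_eq_true.mpr ⟨x, hx, hcx'⟩⟩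
  · intro word_list key result hdom hpre hd
    obtain ⟨hk, hne⟩ := hpre
    have hd' : aLetters key ≠ [] ∧ word_list.any (pvCollides key) = true := hd
    obtain ⟨hne2, hany⟩ := hd'
    have hlen' : ((aLetters key).length == 0) = false := by
      rw [beq_eq_false_iff_ne]
      intro h0
      exact hne2 (List.eq_nil_of_length_eq_zero h0)
    rw [pvA_main word_list key result hlen', pvB_main word_list key result hlen']
    intro hcontra
    have hfil : word_list.filter (pvCondA key) = word_list.filter (pvCondB key) :=
      List.append_cancel_left hcontra
    obtain ⟨w0, hw0, hwcol⟩ := List.any_eq_true.mp hany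
    have hdiff := pvWordDiff key w0 hne hwcol
    have hpoint : ∀ x ∈ word_list, pvCondA key x = true → pvCondB key x = true := by
      intro x hx hpx
      by_cases hcx : pvCollides key x = true
      · rw [(pvWordDiff key x hne hcx).1] at hpx
        cases hpx
      · rw [← pvWord key x hne (by simpa using hcx)]
        exact hpx
    have hlt := pvCountP_lt (pvCondA key) (pvCondB key) word_list hpoint hw0 hdiff.1 hdiff.2
    have heqc : word_list.countP (pvCondA key) = word_list.countP (pvCondB key) := by
      rw [List.countP_eq_length_filter, List.countP_eq_length_filter, hfil]
    omega

-- ===== VERDICT (by name: the statement is the Claim_ definition above) =====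
theorem letters_search_spec : Claim_unchanged_letters_search := letters_search_claims.1
theorem letters_search_changed : Claim_changed_letters_search := by
  unfold Claim_changed_letters_search; decide
theorem letters_search_tight : Claim_exact_letters_search := letters_search_claims.2
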